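-- pv_equiv track=rewrite | github.com/Elann/code_stage | portees_chgt_repere.py | separe_les_portees
-- ===== SOURCE A (Python) =====
-- delta_dist = 5
--
-- def separe_les_portees(liste,l2):
-- 	liste.sort()
-- 	l = []
-- 	r = 1
-- 	if len(liste) > 0:
-- 		for i in range(len(liste)-1):
-- 			#si la liste en i est trop éloignée de la liste en i+1
-- 			#elles font partie de portées différentes
-- 			if (liste[i][0] > liste[i+1][0]+delta_dist) or (liste[i][0] < liste[i+1][0]-delta_dist):
-- 				l2.append(liste[:i+1])
-- 				liste = liste[i+1:]
-- 				#on recommence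
-- 				separe_les_portees(liste,l2)
-- 				r = 0 #on ne finit pas la boucle
-- 				break
-- 			else:
-- 				l.append(liste[i])
-- 		if r != 0: #si on a fini la boucle
-- 			l.append(liste[len(liste)-1])
-- 			l2.append(l)
-- 	return l2
-- ===== SOURCE B (Python) =====
-- delta_dist = 5
--
-- def separe_les_portees(liste, l2):
--     # Single linear pass over the sorted list, cutting a group whenever the
--     # gap between consecutive first coordinates exceeds delta_dist.
--     # Like A, this sorts `liste` in place and appends the groups to `l2`.
--     liste.sort()
--     if not liste:
--         return l2
--     group = [liste[0]]
--     for p in liste[1:]: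
--         if abs(p[0] - group[-1][0]) > delta_dist:
--             l2.append(group)
--             group = [p]
--         else:
--             group.append(p)
--     l2.append(group)
--     return l2
-- ===== Notes on version B (the rewrite author's own statement) =====
-- stated objective: alternative
-- what changed: A cuts the sorted list at the first big gap, slices the remainder and recurses (sorting and scanning each remainder again); B makes one linear pass over the once-sorted list, starting a new group whenever the gap between consecutive first coordinates exceeds delta_dist.
import Mathlib
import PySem

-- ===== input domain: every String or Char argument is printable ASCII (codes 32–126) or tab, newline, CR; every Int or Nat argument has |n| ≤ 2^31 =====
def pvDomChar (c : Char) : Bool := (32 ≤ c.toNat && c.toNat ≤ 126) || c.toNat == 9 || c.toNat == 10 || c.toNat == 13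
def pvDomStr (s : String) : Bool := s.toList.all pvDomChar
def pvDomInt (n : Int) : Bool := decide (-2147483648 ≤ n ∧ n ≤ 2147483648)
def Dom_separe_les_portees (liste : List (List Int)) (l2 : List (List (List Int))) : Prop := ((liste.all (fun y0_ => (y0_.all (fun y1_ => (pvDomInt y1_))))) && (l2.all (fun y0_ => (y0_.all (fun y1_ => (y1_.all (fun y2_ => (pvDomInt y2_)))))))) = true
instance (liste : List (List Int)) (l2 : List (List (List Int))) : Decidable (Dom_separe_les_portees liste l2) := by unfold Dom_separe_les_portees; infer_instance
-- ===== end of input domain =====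

-- B replaces A's cut-and-recurse (each cut slices the remainder and sorts it again) by one
-- linear pass over the once-sorted list that cuts a group whenever the gap exceeds delta_dist.
-- Both Pythons sort `liste` in place and append the groups to `l2` (the same mutations); the
-- equivalence proved here is about the return value.

-- ===== PORT A =====

-- Python's list.sort() on lists of lists of ints: lexicographic order
-- (Lean's LinearOrder on List Int is exactly this order).
def pysort (xs : List (List Int)) : List (List Int) :=
  @PySem.List.sorted _ _ List.instLinearOrder.toLT LinearOrder.toDecidableLT xs (fun x => x) false

-- x[0] in Python; raises IndexError on an empty x — such accesses are excluded by Pre_.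
def head0 (x : List Int) : Int := x.headD 0

-- the `for i in range(len(liste)-1)` loop of A: returns (some i, l) if it breaks at index i,
-- (none, l) if it runs to completion, with l the accumulator list
def sepA_loop (liste : List (List Int)) (i : Nat) (l : List (List Int)) :
    Option Nat × List (List Int) :=
  if i + 1 < liste.length then
    if head0 (liste.getD i []) > head0 (liste.getD (i+1) []) + 5 ∨
       head0 (liste.getD i []) < head0 (liste.getD (i+1) []) - 5 then
      (some i, l)
    else
      sepA_loop liste (i+1) (l ++ [liste.getD i []])
  else (none, l)
termination_by liste.length - i

-- helper used by the recursion's termination proof (len(liste.sort()) = len(liste))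
theorem pysort_length (xs : List (List Int)) : (pysort xs).length = xs.length :=
  List.Perm.length_eq
    (@PySem.List.sorted_perm _ _ List.instLinearOrder.toLT LinearOrder.toDecidableLT
      xs (fun x => x) false)

-- `pysort liste` (written three times below) denotes the single list.sort()'d value of `liste`
def separe_les_portees (liste : List (List Int)) (l2 : List (List (List Int))) :
    List (List (List Int)) :=
  if _h : 0 < (pysort liste).length then
    match sepA_loop (pysort liste) 0 [] with
    | (some i, _) =>
        -- l2.append(liste[:i+1]); liste = liste[i+1:]; recurse
        -- (slices at the nonnegative in-range bound i+1: PySem.List.slice_to / slice_from)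
        separe_les_portees ((pysort liste).drop (i+1)) (l2 ++ [(pysort liste).take (i+1)])
    | (none, l) =>
        -- l.append(liste[len(liste)-1]); l2.append(l)
        l2 ++ [l ++ [(pysort liste).getD ((pysort liste).length - 1) []]]
  else l2
termination_by liste.length
decreasing_by
  have := pysort_length liste
  simp only [List.length_drop]
  omega

-- ===== PORT B =====

-- the `for p in liste[1:]` loop of Source B, carrying the current group and l2
def sepB_go (ps : List (List Int)) (group : List (List Int)) (l2 : List (List (List Int))) :
    List (List (List Int)) :=
  match ps with
  | [] => l2 ++ [group]                              -- final l2.append(group)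
  | p :: rest =>
      -- abs(p[0] - group[-1][0]) > delta_dist   (group is never empty here)
      if 5 < |head0 p - head0 (group.getLastD [])| then
        sepB_go rest [p] (l2 ++ [group])
      else
        sepB_go rest (group ++ [p]) l2

def separe_les_portees_alt (liste : List (List Int)) (l2 : List (List (List Int))) :
    List (List (List Int)) :=
  match pysort liste with                            -- liste.sort(); if not liste: return l2
  | [] => l2
  | p :: rest => sepB_go rest [p] l2                 -- group = [liste[0]]; loop over liste[1:]

-- ===== PRECONDITION & SPEC =====
-- Pre_ excludes exactly the inputs on which Python A raises IndexError: a `liste` with at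
-- least two elements one of which is an empty inner list (A evaluates liste[i][0] there;
-- B raises there as well).
def Pre_separe_les_portees (liste : List (List Int)) (l2 : List (List (List Int))) : Prop :=
  liste.length ≤ 1 ∨ ∀ x ∈ liste, x ≠ []
instance (liste : List (List Int)) (l2 : List (List (List Int))) : Decidable (Pre_separe_les_portees liste l2) := by unfold Pre_separe_les_portees; infer_instance

def pvWitness_separe_les_portees : List (List Int) × List (List (List Int)) :=
  ([[10, 2], [1], [3, 7], [20]], [[[0]]])

def Spec_separe_les_portees (liste : List (List Int)) (l2 : List (List (List Int))) (out : List (List (List Int))) : Prop := out = separe_les_portees_alt liste l2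
instance (liste : List (List Int)) (l2 : List (List (List Int))) (out : List (List (List Int))) : Decidable (Spec_separe_les_portees liste l2 out) := by unfold Spec_separe_les_portees; infer_instance

-- ===== CLAIM =====
def Claim_equal_separe_les_portees : Prop := ∀ (liste : List (List Int)) (l2 : List (List (List Int))), Dom_separe_les_portees liste l2 → Pre_separe_les_portees liste l2 → Spec_separe_les_portees liste l2 (separe_les_portees liste l2)

-- ===== LEMMAS AND PROOFS =====

-- relative index of the first adjacent "far" pair (structural version of A's loop test)
def firstCut : List (List Int) → Option Nat
  | a :: b :: t =>
      if head0 a > head0 b + 5 ∨ head0 a < head0 b - 5 then some 0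
      else (firstCut (b :: t)).map (· + 1)
  | _ => none

-- A's break test and B's abs test agree
theorem far_iff (x y : Int) : (x > y + 5 ∨ x < y - 5) ↔ 5 < |y - x| := by
  rcases abs_cases (y - x) with ⟨h, _⟩ | ⟨h, _⟩ <;> omega

-- the index-based loop of port A, characterised by the structural scan
theorem sepA_loop_eq (s : List (List Int)) :
    ∀ (k i : Nat) (l : List (List Int)), s.length - i ≤ k →
    sepA_loop s i l =
      (match firstCut (s.drop i) with
       | some j => (some (j + i), l ++ (s.drop i).take j)
       | none => (none, l ++ (s.drop i).dropLast)) := by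
  intro k
  induction k with
  | zero =>
      intro i l h
      rw [sepA_loop, if_neg (by omega)]
      have hd : s.drop i = [] := List.drop_eq_nil_of_le (by omega)
      simp [hd, firstCut]
  | succ k ih =>
      intro i l h
      by_cases h1 : i + 1 < s.length
      · have hi : i < s.length := by omega
        have hd : s.drop i = s[i] :: s.drop (i + 1) := List.drop_eq_getElem_cons hi
        have hd2 : s.drop (i + 1) = s[i + 1] :: s.drop (i + 2) := List.drop_eq_getElem_cons h1
        rw [sepA_loop, if_pos h1, List.getD_eq_getElem s [] hi, List.getD_eq_getElem s [] h1]
        by_cases hf : head0 s[i] > head0 s[i + 1] + 5 ∨ head0 s[i] < head0 s[i + 1] - 5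
        · rw [if_pos hf, hd, hd2, firstCut, if_pos hf]
          simp
        · rw [if_neg hf, ih (i + 1) (l ++ [s[i]]) (by omega), hd, hd2, firstCut, if_neg hf]
          rw [← hd2]
          cases hfc : firstCut (s.drop (i + 1)) with
          | none =>
              simp only [Option.map_none]
              rw [hd2, List.dropLast_cons₂, ← hd2]
              simp
          | some j =>
              simp only [Option.map_some]
              have hn : j + 1 + i = j + (i + 1) := by omega
              rw [hd2, ← hd2]
              simp [hn]
              rw [hd, List.take_succ_cons]
      · rw [sepA_loop, if_neg h1]
        have hlen : (s.drop i).length ≤ 1 := by simp; omega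
        cases hd : s.drop i with
        | nil => simp [firstCut]
        | cons a t =>
            cases t with
            | nil => simp [firstCut]
            | cons b u => rw [hd] at hlen; simp at hlen

def sepB_top (s : List (List Int)) (l2 : List (List (List Int))) : List (List (List Int)) :=
  match s with
  | [] => l2
  | p :: rest => sepB_go rest [p] l2

-- B's loop, characterised by the same structural scan: it emits the group up to the first
-- far pair and restarts after it
theorem sepB_char (xs : List (List Int)) :
    ∀ (c : List Int) (g : List (List Int)) (l2 : List (List (List Int))),
    (firstCut (c :: xs) = none → sepB_go xs (g ++ [c]) l2 = l2 ++ [g ++ c :: xs]) ∧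
    (∀ j, firstCut (c :: xs) = some j →
      sepB_go xs (g ++ [c]) l2 =
        sepB_top ((c :: xs).drop (j + 1)) (l2 ++ [g ++ (c :: xs).take (j + 1)])) := by
  induction xs with
  | nil =>
      intro c g l2
      constructor
      · intro _; simp [sepB_go]
      · intro j hj; simp [firstCut] at hj
  | cons b t ih =>
      intro c g l2
      have hstep : sepB_go (b :: t) (g ++ [c]) l2 =
          if 5 < |head0 b - head0 c| then sepB_go t [b] (l2 ++ [g ++ [c]])
          else sepB_go t ((g ++ [c]) ++ [b]) l2 := by
        rw [sepB_go]; simp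
      by_cases hf : head0 c > head0 b + 5 ∨ head0 c < head0 b - 5
      · have habs : 5 < |head0 b - head0 c| := (far_iff (head0 c) (head0 b)).mp hf
        have hcut : firstCut (c :: b :: t) = some 0 := by rw [firstCut, if_pos hf]
        constructor
        · intro hnone; rw [hcut] at hnone; exact absurd hnone (by simp)
        · intro j hj
          rw [hcut] at hj
          obtain rfl : j = 0 := by simpa using hj.symm
          rw [hstep, if_pos habs]
          simp [sepB_top]
      · have habs : ¬ 5 < |head0 b - head0 c| :=
          fun hx => hf ((far_iff (head0 c) (head0 b)).mpr hx)
        have hcut : firstCut (c :: b :: t) = (firstCut (b :: t)).map (· + 1) := by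
          rw [firstCut, if_neg hf]
        constructor
        · intro hnone
          rw [hcut] at hnone
          have hn : firstCut (b :: t) = none := by
            cases hx : firstCut (b :: t) <;> simp [hx] at hnone ⊢
          rw [hstep, if_neg habs, (ih b (g ++ [c]) l2).1 hn]
          simp
        · intro j hj
          rw [hcut] at hj
          obtain ⟨j', hj', rfl⟩ : ∃ j', firstCut (b :: t) = some j' ∧ j = j' + 1 := by
            cases hx : firstCut (b :: t) with
            | none => rw [hx] at hj; simp at hj
            | some m => rw [hx] at hj; simp at hj; exact ⟨m, rfl, hj.symm⟩
          rw [hstep, if_neg habs, (ih b (g ++ [c]) l2).2 j' hj']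
          simp [List.take_succ_cons]

theorem sepB_top_none (p : List Int) (rest : List (List Int)) (l2 : List (List (List Int)))
    (hfc : firstCut (p :: rest) = none) : sepB_top (p :: rest) l2 = l2 ++ [p :: rest] := by
  show sepB_go rest [p] l2 = _
  have h := (sepB_char rest p [] l2).1 hfc
  simpa using h

theorem sepB_top_some (p : List Int) (rest : List (List Int)) (l2 : List (List (List Int)))
    (j : Nat) (hfc : firstCut (p :: rest) = some j) :
    sepB_top (p :: rest) l2 =
      sepB_top ((p :: rest).drop (j + 1)) (l2 ++ [(p :: rest).take (j + 1)]) := by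
  show sepB_go rest [p] l2 = _
  have h := (sepB_char rest p [] l2).2 j hfc
  simpa using h

-- main induction: port A on any input equals B's single pass over the sorted list
theorem A_main : ∀ (n : Nat) (liste : List (List Int)), liste.length ≤ n →
    ∀ l2, separe_les_portees liste l2 = sepB_top (pysort liste) l2 := by
  intro n
  induction n with
  | zero =>
      intro liste h l2
      have hnil : liste = [] := List.eq_nil_of_length_eq_zero (by omega)
      subst hnil
      have h0 : pysort ([] : List (List Int)) = [] :=
        PySem.List.sorted_eq_self_of_pairwise [] _ (List.Pairwise.nil)
      rw [separe_les_portees]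
      simp [h0, sepB_top]
  | succ n ih =>
      intro liste h l2
      have hsp : (pysort liste).Pairwise (· ≤ ·) := PySem.List.sorted_pairwise liste _
      have hlen : (pysort liste).length = liste.length := pysort_length liste
      rw [separe_les_portees]
      by_cases h0 : 0 < (pysort liste).length
      · rw [dif_pos h0]
        rw [sepA_loop_eq (pysort liste) (pysort liste).length 0 [] (by omega)]
        simp only [List.drop_zero]
        obtain ⟨p, rest, hs⟩ : ∃ p rest, pysort liste = p :: rest := by
          cases hps : pysort liste with
          | nil => rw [hps] at h0; simp at h0
          | cons p rest => exact ⟨p, rest, rfl⟩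
        cases hfc : firstCut (pysort liste) with
        | none =>
            rw [hs] at hfc
            rw [hs, sepB_top_none p rest l2 hfc]
            have hne : (p :: rest : List (List Int)) ≠ [] := by simp
            have hget : (p :: rest).getD ((p :: rest).length - 1) [] = (p :: rest).getLast hne := by
              rw [List.getLast_eq_getElem, List.getD_eq_getElem]
            rw [hget]
            simp only [List.nil_append]
            rw [List.dropLast_concat_getLast]
        | some j =>
            simp only [Nat.add_zero]
            rw [hs] at hfc hsp hlen
            rw [hs, sepB_top_some p rest l2 j hfc]
            have hd : ((p :: rest : List (List Int)).drop (j + 1)).length ≤ n := by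
              simp only [List.length_drop, List.length_cons]
              simp only [List.length_cons] at hlen
              omega
            rw [ih _ hd]
            have hpd : pysort ((p :: rest).drop (j + 1)) = (p :: rest).drop (j + 1) :=
              PySem.List.sorted_eq_self_of_pairwise _ _
                (List.Pairwise.sublist (List.drop_sublist _ _) hsp)
            rw [hpd]
      · rw [dif_neg h0]
        have hnil : pysort liste = [] := by
          cases hps : pysort liste with
          | nil => rfl
          | cons a t => rw [hps] at h0; simp at h0
        rw [hnil, sepB_top]

-- ===== VERDICT =====
theorem separe_les_portees_spec : Claim_equal_separe_les_portees := by
  intro liste l2 _ _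
  unfold Spec_separe_les_portees
  rw [A_main liste.length liste (Nat.le_refl _) l2]
  unfold separe_les_portees_alt sepB_top
  cases pysort liste <;> rfl
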